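-- pv_equiv track=rewrite | github.com/teomaik/Code_Beauty_Calculator | code aesthetics/utils.py | groups_blank_lines
-- ===== SOURCE A (Python) =====
-- def groups_blank_lines(binary_table):
--     """
--     Analyzes sequences of blank lines in a binary table.
--
--     Args:
--     - binary_table (list of list of int): The binary table.
--
--     Returns:
--     - group_counts (dict): A dictionary where keys are the lengths of blank-line sequences
--                            and values are their counts.
--     - distinct_groups (int): The number of distinct groups (unique lengths of blank-line sequences).
--     """
--     group_counts = {}
--     consecutive_blank_lines = 0
--
--     for row in binary_table:
--         if all(cell == 0 for cell in row):  # Check if the line is blank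
--             consecutive_blank_lines += 1
--         else:
--             if consecutive_blank_lines > 0:
--                 # Increment the count for the length of the blank-line sequence
--                 group_counts[consecutive_blank_lines] = group_counts.get(consecutive_blank_lines, 0) + 1
--                 consecutive_blank_lines = 0
--
--     # Handle the case where the last lines in the table are blank
--     if consecutive_blank_lines > 0:
--         group_counts[consecutive_blank_lines] = group_counts.get(consecutive_blank_lines, 0) + 1
--
--     distinct_groups = len(group_counts)
--     return group_counts, distinct_groups
-- ===== SOURCE B (Python) =====
-- def groups_blank_lines(binary_table):
--     # Blank-run lengths are the gaps between consecutive non-blank row indices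
--     # (with sentinels -1 before the table and len(table) after it).
--     nonblank = [i for i, row in enumerate(binary_table) if any(cell != 0 for cell in row)]
--     bounds = [-1] + nonblank + [len(binary_table)]
--     group_counts = {}
--     for prev, nxt in zip(bounds, bounds[1:]):
--         gap = nxt - prev - 1
--         if gap > 0:
--             group_counts[gap] = group_counts.get(gap, 0) + 1
--     return group_counts, len(group_counts)
-- ===== Notes on version B (the rewrite author's own statement) =====
-- stated objective: alternative
-- what changed: Instead of a running blank counter with a trailing fixup, B collects the indices of non-blank rows, brackets them with sentinels -1 and len(table), and counts the positive gaps between consecutive bounds as the blank-run lengths.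
import Mathlib
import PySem

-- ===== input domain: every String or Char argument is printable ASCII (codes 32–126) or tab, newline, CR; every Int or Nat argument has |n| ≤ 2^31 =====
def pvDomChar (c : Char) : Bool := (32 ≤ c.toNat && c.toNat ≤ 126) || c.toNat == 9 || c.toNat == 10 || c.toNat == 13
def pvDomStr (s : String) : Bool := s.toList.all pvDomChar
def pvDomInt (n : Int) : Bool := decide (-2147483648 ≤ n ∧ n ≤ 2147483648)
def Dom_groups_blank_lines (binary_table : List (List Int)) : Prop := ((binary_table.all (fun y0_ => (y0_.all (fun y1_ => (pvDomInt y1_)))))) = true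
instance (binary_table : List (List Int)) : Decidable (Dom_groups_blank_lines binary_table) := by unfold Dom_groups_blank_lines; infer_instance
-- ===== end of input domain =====

-- B replaces A's running blank-counter with trailing fixup by collecting the
-- indices of non-blank rows and counting the positive gaps between consecutive
-- bounds (objective: alternative; same cost).

-- ===== PORT A =====
-- all(cell == 0 for cell in row)
def pvIsBlank (row : List Int) : Bool := row.all (fun cell => cell == 0)

-- body of A's for-loop over rows, on state (group_counts, consecutive_blank_lines)
def pvStepA (st : PySem.Dict Int Int × Int) (row : List Int) : PySem.Dict Int Int × Int :=
  if pvIsBlank row then (st.1, st.2 + 1)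
  else if st.2 > 0 then (st.1.insert st.2 (st.1.getD st.2 0 + 1), 0)
  else st

def groups_blank_lines (binary_table : List (List Int)) : (List (Int × Int)) × Int :=
  let st := binary_table.foldl pvStepA (PySem.Dict.empty, 0)
  -- trailing fixup: if consecutive_blank_lines > 0 after the loop
  let gc := if st.2 > 0 then st.1.insert st.2 (st.1.getD st.2 0 + 1) else st.1
  (gc.items, (gc.size : Int))

-- ===== PORT B =====
-- [i for i, row in enumerate(binary_table) if any(cell != 0 for cell in row)]
def pvNonBlankIdx (binary_table : List (List Int)) : List Int :=
  ((PySem.List.enumerate binary_table 0).filter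
    (fun p => p.2.any (fun cell => cell != 0))).map (fun p => p.1)

-- loop body: gap = nxt - prev - 1; if gap > 0: counts[gap] = counts.get(gap, 0) + 1
def pvGapStep (d : PySem.Dict Int Int) (p : Int × Int) : PySem.Dict Int Int :=
  let gap := p.2 - p.1 - 1
  if gap > 0 then d.insert gap (d.getD gap 0 + 1) else d

def groups_blank_lines_alt (binary_table : List (List Int)) : (List (Int × Int)) × Int :=
  let nonblank := pvNonBlankIdx binary_table
  let bounds := -1 :: (nonblank ++ [(binary_table.length : Int)])
  -- zip(bounds, bounds[1:])  (bounds[1:] = drop 1)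
  let counts := (bounds.zip (bounds.drop 1)).foldl pvGapStep PySem.Dict.empty
  (counts.items, (counts.size : Int))

-- ===== PRECONDITION & SPEC =====
def Spec_groups_blank_lines (binary_table : List (List Int)) (out : (List (Int × Int)) × Int) : Prop := out = groups_blank_lines_alt binary_table
instance (binary_table : List (List Int)) (out : (List (Int × Int)) × Int) : Decidable (Spec_groups_blank_lines binary_table out) := by unfold Spec_groups_blank_lines; infer_instance

-- ===== CLAIM (what is proved, stated in full; the proofs are below) =====
def Claim_equal_groups_blank_lines : Prop := ∀ (binary_table : List (List Int)), Dom_groups_blank_lines binary_table → Spec_groups_blank_lines binary_table (groups_blank_lines binary_table)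

-- ===== LEMMAS AND PROOFS =====

-- count one gap g (the common core of both loop bodies)
def pvStep1 (d : PySem.Dict Int Int) (g : Int) : PySem.Dict Int Int :=
  if g > 0 then d.insert g (d.getD g 0 + 1) else d

-- A's loop body as a function of the row's blank flag
def pvStepF (st : PySem.Dict Int Int × Int) (b : Bool) : PySem.Dict Int Int × Int :=
  if b then (st.1, st.2 + 1)
  else if st.2 > 0 then (st.1.insert st.2 (st.1.getD st.2 0 + 1), 0)
  else st

-- A's trailing fixup
def pvFinish (st : PySem.Dict Int Int × Int) : PySem.Dict Int Int :=
  if st.2 > 0 then st.1.insert st.2 (st.1.getD st.2 0 + 1) else st.1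

-- B's bounds-pair fold, recast as a walk along (prev, remaining nonblank indices, end)
def pvGFold (d : PySem.Dict Int Int) (prev : Int) (ps : List Int) (e : Int) : PySem.Dict Int Int :=
  match ps with
  | [] => pvStep1 d (e - prev - 1)
  | q :: qs => pvGFold (pvStep1 d (q - prev - 1)) q qs e

-- indices (starting at k) of the false entries of a flag list
def pvNB (k : Int) : List Bool → List Int
  | [] => []
  | true :: bs => pvNB (k + 1) bs
  | false :: bs => k :: pvNB (k + 1) bs

theorem pv_zip_gfold (xs : List Int) (prev e : Int) (d : PySem.Dict Int Int) :
    (((prev :: (xs ++ [e])).zip (xs ++ [e])).foldl pvGapStep d) = pvGFold d prev xs e := by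
  induction xs generalizing prev d with
  | nil => simp [pvGFold, pvGapStep, pvStep1]
  | cons q qs ih =>
    simp only [List.cons_append, List.zip_cons_cons, List.foldl_cons]
    rw [ih]
    rfl

theorem pv_nonblank_nb (tbl : List (List Int)) (k : Int) :
    ((PySem.List.enumerate tbl k).filter (fun p => p.2.any (fun cell => cell != 0))).map
      (fun p => p.1) = pvNB k (tbl.map pvIsBlank) := by
  induction tbl generalizing k with
  | nil => simp [pvNB]
  | cons row rows ih =>
    rw [PySem.List.enumerate_cons]
    cases h : pvIsBlank row with
    | true =>
      have : row.any (fun cell => cell != 0) = false := by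
        simpa [pvIsBlank, List.all_eq_not_any_not] using h
      simp [this, pvNB, h, ih]
    | false =>
      have : row.any (fun cell => cell != 0) = true := by
        simpa [pvIsBlank, List.all_eq_not_any_not] using h
      simp [this, pvNB, h, ih]

theorem pvGFold_congr (d d' : PySem.Dict Int Int) (p p' e e' : Int) (ps : List Int)
    (hd : d = d') (hp : p = p') (he : e = e') : pvGFold d p ps e = pvGFold d' p' ps e' := by
  subst hd; subst hp; subst he; rfl

theorem pv_main (fs : List Bool) (k : Int) (c : Nat) (d : PySem.Dict Int Int) :
    pvGFold d (k - (c : Int) - 1) (pvNB k fs) (k + fs.length) =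
      pvFinish (fs.foldl pvStepF (d, (c : Int))) := by
  induction fs generalizing k c d with
  | nil =>
    have h : k + (([] : List Bool)).length - (k - (c : Int) - 1) - 1 = (c : Int) := by
      simp; ring
    simp only [pvNB, pvGFold, h, List.foldl_nil]
    rcases Nat.eq_zero_or_pos c with hc | hc
    · subst hc; simp [pvStep1, pvFinish]
    · simp [pvStep1, pvFinish, hc]
  | cons b bs ih =>
    cases b with
    | true =>
      rw [List.foldl_cons,
        show pvStepF (d, (c : Int)) true = (d, ((c + 1 : Nat) : Int)) by simp [pvStepF],
        ← ih (k + 1) (c + 1) d,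
        show pvNB k (true :: bs) = pvNB (k + 1) bs from rfl]
      exact pvGFold_congr _ _ _ _ _ _ _ rfl (by push_cast; ring)
        (by push_cast [List.length_cons]; ring)
    | false =>
      have hstep : pvStepF (d, (c : Int)) false = (pvStep1 d (c : Int), ((0 : Nat) : Int)) := by
        rcases Nat.eq_zero_or_pos c with hc | hc
        · subst hc; simp [pvStepF, pvStep1]
        · simp [pvStepF, pvStep1, hc]
      rw [List.foldl_cons, hstep, ← ih (k + 1) 0 (pvStep1 d (c : Int)),
        show pvNB k (false :: bs) = k :: pvNB (k + 1) bs from rfl]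
      show pvGFold (pvStep1 d (k - (k - (c : Int) - 1) - 1)) k (pvNB (k + 1) bs)
          (k + (((false :: bs : List Bool)).length : Int)) = _
      exact pvGFold_congr _ _ _ _ _ _ _
        (by rw [show k - (k - (c : Int) - 1) - 1 = (c : Int) by ring])
        (by push_cast; ring) (by push_cast [List.length_cons]; ring)

-- ===== VERDICT (by name: the statement is the Claim_ definition above) =====
theorem groups_blank_lines_spec : Claim_equal_groups_blank_lines := by
  intro tbl _
  unfold Spec_groups_blank_lines groups_blank_lines groups_blank_lines_alt
  simp only []
  have hnb : pvNonBlankIdx tbl = pvNB 0 (tbl.map pvIsBlank) := pv_nonblank_nb tbl 0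
  have hA : tbl.foldl pvStepA (PySem.Dict.empty, 0) =
      (tbl.map pvIsBlank).foldl pvStepF (PySem.Dict.empty, 0) := by
    rw [List.foldl_map]; rfl
  have hcounts :
      ((((-1 : Int) :: (pvNonBlankIdx tbl ++ [(tbl.length : Int)])).zip
        (((-1 : Int) :: (pvNonBlankIdx tbl ++ [(tbl.length : Int)])).drop 1)).foldl
          pvGapStep PySem.Dict.empty)
      = pvFinish (tbl.foldl pvStepA (PySem.Dict.empty, 0)) := by
    have hd : (((-1 : Int) :: (pvNonBlankIdx tbl ++ [(tbl.length : Int)])).drop 1)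
        = pvNonBlankIdx tbl ++ [(tbl.length : Int)] := by simp
    rw [hd, pv_zip_gfold, hnb, hA]
    have := pv_main (tbl.map pvIsBlank) 0 0 PySem.Dict.empty
    simpa using this
  rw [hcounts, hA]
  rfl
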